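-- pv_equiv track=rewrite | github.com/EAFIT-AACS/assignment2-bestgroup | ALGORITHM_3_LFCO_2025_STUDENT_INITIALS.py | generar_arbol_derivacion
-- ===== SOURCE A (Python) =====
-- def generar_arbol_derivacion(cadena):
--
-- # Genera el árbol de derivación para una cadena dada.
--
--     contador_nodos = 0
--     pila = [(0, "S")]  # Se inicia la pila con el símbolo de inicio "S"
--     aristas = []  # Lista para almacenar las conexiones entre nodos
--
--     # Se procesa la cadena de entrada para construir el árbol de derivación
--     while pila:
--         id_padre, simbolo = pila.pop()
--         if simbolo == "S":
--             if cadena: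
--                 caracter = cadena[0]  # Se extrae el primer carácter de la cadena
--                 cadena = cadena[1:]  # Se elimina el primer carácter de la cadena
--                 if caracter == "a":
--                     id_izquierda = contador_nodos + 1
--                     id_medio = contador_nodos + 2
--                     id_derecha = contador_nodos + 3
--                     contador_nodos += 3
--                     aristas.append((id_padre, id_izquierda, "a"))
--                     aristas.append((id_padre, id_medio, "S"))
--                     aristas.append((id_padre, id_derecha, "b"))
--                     pila.append((id_derecha, "b"))
--                     pila.append((id_medio, "S"))
--                     pila.append((id_izquierda, "a"))
--             else:
--                 contador_nodos += 1
--                 aristas.append((id_padre, contador_nodos, "eps"))  # Se representa la derivación vacía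
--     return aristas
-- ===== SOURCE B (Python) =====
-- def generar_arbol_derivacion(cadena):
--     # Single pass: count the leading run of 'a's, then emit the edges in closed form.
--     k = 0
--     while k < len(cadena) and cadena[k] == "a":
--         k += 1
--     aristas = []
--     padre = 0
--     for i in range(k):
--         aristas.append((padre, 3 * i + 1, "a"))
--         aristas.append((padre, 3 * i + 2, "S"))
--         aristas.append((padre, 3 * i + 3, "b"))
--         padre = 3 * i + 2
--     if k == len(cadena):
--         aristas.append((padre, 3 * k + 1, "eps"))
--     return aristas
-- ===== Notes on version B (the rewrite author's own statement) =====
-- stated objective: faster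
-- what changed: Replaced the stack-driven rewriting loop with repeated O(n) string slicing by a single index pass that counts the leading run of 'a's and emits the edges in closed form.
import Mathlib
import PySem

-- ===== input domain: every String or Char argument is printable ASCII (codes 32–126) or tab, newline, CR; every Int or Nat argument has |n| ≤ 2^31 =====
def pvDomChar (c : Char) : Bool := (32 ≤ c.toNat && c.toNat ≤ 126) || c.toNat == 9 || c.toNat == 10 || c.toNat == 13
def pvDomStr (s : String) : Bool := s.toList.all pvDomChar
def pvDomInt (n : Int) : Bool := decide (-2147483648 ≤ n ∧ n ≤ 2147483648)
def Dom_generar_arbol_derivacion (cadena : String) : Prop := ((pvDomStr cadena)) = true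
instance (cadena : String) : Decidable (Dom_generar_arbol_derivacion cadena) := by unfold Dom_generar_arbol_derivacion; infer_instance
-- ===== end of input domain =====

-- B replaces A's stack-driven loop with quadratic slicing by a single linear pass
-- counting the leading run of 'a's (objective: faster).

-- ===== PORT A =====
-- the while-pila loop of A: state (contador_nodos, pila with head = top of stack,
-- remaining cadena, aristas accumulated in order)
def genA_loop (contador : Int) (pila : List (Int × String)) (cadena : List Char)
    (aristas : List (Int × Int × String)) : List (Int × Int × String) :=
  match pila with
  | [] => aristas
  | (id_padre, simbolo) :: rest =>
    if simbolo = "S" then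
      match cadena with
      | caracter :: resto =>
        if caracter = 'a' then
          genA_loop (contador + 3)
            ((contador + 1, "a") :: (contador + 2, "S") :: (contador + 3, "b") :: rest)
            resto
            (aristas ++ [(id_padre, contador + 1, "a"), (id_padre, contador + 2, "S"),
                         (id_padre, contador + 3, "b")])
        else
          genA_loop contador rest resto aristas
      | [] =>
        genA_loop (contador + 1) rest [] (aristas ++ [(id_padre, contador + 1, "eps")])
    else
      genA_loop contador rest cadena aristas
termination_by 3 * cadena.length + pila.length
decreasing_by all_goals (simp_all; try omega)

def generar_arbol_derivacion (cadena : String) : List (Int × Int × String) :=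
  genA_loop 0 [(0, "S")] cadena.toList []

-- ===== PORT B =====
-- the leading-'a' counting while loop of B
def countA : List Char → Nat
  | c :: cs => if c = 'a' then countA cs + 1 else 0
  | [] => 0

-- the for-i-in-range(k) loop of B: i is the range index, returns (aristas, final padre)
def genB_loop (i : Int) (n : Nat) (padre : Int) : List (Int × Int × String) × Int :=
  match n with
  | 0 => ([], padre)
  | Nat.succ m =>
    let r := genB_loop (i + 1) m (3 * i + 2)
    ((padre, 3 * i + 1, "a") :: (padre, 3 * i + 2, "S") :: (padre, 3 * i + 3, "b") :: r.1, r.2)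

def generar_arbol_derivacion_alt (cadena : String) : List (Int × Int × String) :=
  let l := cadena.toList
  let k := countA l
  let r := genB_loop 0 k 0
  if k = l.length then r.1 ++ [(r.2, 3 * (k : Int) + 1, "eps")] else r.1

-- ===== PRECONDITION & SPEC =====
def Spec_generar_arbol_derivacion (cadena : String) (out : List (Int × Int × String)) : Prop := out = generar_arbol_derivacion_alt cadena
instance (cadena : String) (out : List (Int × Int × String)) : Decidable (Spec_generar_arbol_derivacion cadena out) := by unfold Spec_generar_arbol_derivacion; infer_instance

-- ===== CLAIM (what is proved, stated in full; the proofs are below) =====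
def Claim_equal_generar_arbol_derivacion : Prop := ∀ (cadena : String), Dom_generar_arbol_derivacion cadena → Spec_generar_arbol_derivacion cadena (generar_arbol_derivacion cadena)

-- ===== LEMMAS AND PROOFS =====

-- abstract description of what A's loop produces from one pending "S" node
def F (p c : Int) : List Char → List (Int × Int × String)
  | [] => [(p, c + 1, "eps")]
  | ch :: cs =>
    if ch = 'a' then
      (p, c + 1, "a") :: (p, c + 2, "S") :: (p, c + 3, "b") :: F (c + 2) (c + 3) cs
    else []

theorem genA_pop (c p : Int) (s : String) (hs : s ≠ "S") (tl : List (Int × String))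
    (cs : List Char) (ar : List (Int × Int × String)) :
    genA_loop c ((p, s) :: tl) cs ar = genA_loop c tl cs ar := by
  cases cs <;> rw [genA_loop] <;> simp [hs]

theorem genA_loop_junk (pila : List (Int × String)) (h : ∀ x ∈ pila, x.2 ≠ "S") :
    ∀ (c : Int) (cs : List Char) (ar : List (Int × Int × String)),
      genA_loop c pila cs ar = ar := by
  induction pila with
  | nil => intro c cs ar; cases cs <;> rw [genA_loop]
  | cons hd tl ih =>
    intro c cs ar
    obtain ⟨p, s⟩ := hd
    rw [genA_pop c p s (h (p, s) (by simp)) tl cs ar]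
    exact ih (fun x hx => h x (by simp [hx])) c cs ar

theorem rest_b_ok (c : Int) (rest : List (Int × String)) (h : ∀ x ∈ rest, x.2 ≠ "S") :
    ∀ x ∈ (c + 3, "b") :: rest, x.2 ≠ "S" := by
  intro x hx
  simp only [List.mem_cons] at hx
  cases hx with
  | inl h1 => simp [h1]
  | inr h2 => exact h x h2

theorem genA_loop_main (cs : List Char) :
    ∀ (p c : Int) (rest : List (Int × String)) (ar : List (Int × Int × String)),
      (∀ x ∈ rest, x.2 ≠ "S") →
      genA_loop c ((p, "S") :: rest) cs ar = ar ++ F p c cs := by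
  induction cs with
  | nil =>
    intro p c rest ar h
    rw [genA_loop]
    simp only [reduceIte]
    rw [genA_loop_junk rest h, F]
  | cons ch cs' ih =>
    intro p c rest ar h
    rw [genA_loop]
    simp only [reduceIte]
    by_cases hch : ch = 'a'
    · rw [if_pos hch]
      rw [genA_pop (c + 3) (c + 1) "a" (by decide) _ cs' _]
      rw [ih (c + 2) (c + 3) ((c + 3, "b") :: rest) _ (rest_b_ok c rest h)]
      simp [F, hch, List.append_assoc]
    · rw [if_neg hch]
      rw [genA_loop_junk rest h]
      simp [F, hch]

theorem F_eq_B (cs : List Char) :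
    ∀ (i p : Int),
      F p (3 * i) cs =
        (genB_loop i (countA cs) p).1 ++
          (if countA cs = cs.length then
            [((genB_loop i (countA cs) p).2, 3 * (i + (countA cs : Int)) + 1, "eps")]
          else []) := by
  induction cs with
  | nil =>
    intro i p
    simp [F, countA, genB_loop]
  | cons ch cs' ih =>
    intro i p
    by_cases hch : ch = 'a'
    · have hc : countA (ch :: cs') = countA cs' + 1 := by simp [countA, hch]
      rw [hc, F]
      simp only [if_pos hch]
      have hF : F (3 * i + 2) (3 * i + 3) cs' = F (3 * i + 2) (3 * (i + 1)) cs' := by ring_nf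
      rw [hF, ih (i + 1) (3 * i + 2), genB_loop]
      have hcond : (countA cs' + 1 = (ch :: cs').length) ↔ (countA cs' = cs'.length) := by
        simp
      by_cases hlen : countA cs' = cs'.length
      · rw [if_pos hlen, if_pos (hcond.mpr hlen)]
        push_cast
        ring_nf
        simp
      · rw [if_neg hlen, if_neg (fun hh => hlen (hcond.mp hh))]
        ring_nf
        simp
    · have hc : countA (ch :: cs') = 0 := by simp [countA, hch]
      rw [hc]
      rw [if_neg (by simp : ¬ (0 = (ch :: cs').length))]
      simp [F, hch, genB_loop]

-- ===== VERDICT (by name: the statement is the Claim_ definition above) =====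
theorem generar_arbol_derivacion_spec : Claim_equal_generar_arbol_derivacion := by
  intro cadena _
  unfold Spec_generar_arbol_derivacion generar_arbol_derivacion generar_arbol_derivacion_alt
  rw [genA_loop_main cadena.toList 0 0 [] [] (by simp)]
  have h := F_eq_B cadena.toList 0 0
  simp only [mul_zero, zero_add] at h
  rw [h]
  split <;> simp_all [String.length_toList]
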